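-- pv_equiv track=rewrite | github.com/jongpark1234/Baekjoon | 10000/baekjoon_10433.py | solve
-- ===== SOURCE A (Python) =====
-- def solve(gould: int) -> int:
--     sign = gould & 2147483648
--     expc = (gould & 2130706432) >> 24
--     expv = expc - 64
--     mantissa = gould & 16777215
--     if mantissa == 0:
--         return 0
--     expv <<= 2
--     while (mantissa & 8388608) == 0:
--         mantissa <<= 1
--         expv -= 1
--     expv -= 1
--     if expv > 127:
--         ret = sign | 2139095040
--     elif expv < -149:
--         ret = sign
--     elif expv > -127:
--         expc = expv + 127
--         expc <<= 23
--         ret = sign | expc | (mantissa & 8388607)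
--     else:
--         while expv < -126:
--             expv += 1
--             mantissa >>= 1
--         expc = 0
--         ret = sign | expc | (mantissa & 8388607)
--     return ret
-- ===== SOURCE B (Python) =====
-- def solve(gould: int) -> int:
--     sign = gould & 0x80000000
--     expv = ((gould & 0x7F000000) >> 24) - 64
--     mantissa = gould & 0xFFFFFF
--     if mantissa == 0:
--         return 0
--     # closed-form normalization: bring the top set bit to position 23 in one shift
--     shift = 24 - mantissa.bit_length()
--     mantissa <<= shift
--     expv = (expv << 2) - shift - 1
--     if expv > 127:
--         return sign | 0x7F800000
--     if expv < -149:
--         return sign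
--     if expv > -127:
--         return sign | ((expv + 127) << 23) | (mantissa & 0x7FFFFF)
--     # denormal: one truncating right shift instead of a loop
--     return sign | ((mantissa >> (-126 - expv)) & 0x7FFFFF)
-- ===== Notes on version B (the rewrite author's own statement) =====
-- stated objective: simpler
-- what changed: Both bit-twiddling loops are replaced by closed forms: the normalization while-loop becomes one shift computed from mantissa.bit_length(), and the denormal right-shift loop becomes a single truncating shift whose count is read off the exponent.
import Mathlib
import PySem

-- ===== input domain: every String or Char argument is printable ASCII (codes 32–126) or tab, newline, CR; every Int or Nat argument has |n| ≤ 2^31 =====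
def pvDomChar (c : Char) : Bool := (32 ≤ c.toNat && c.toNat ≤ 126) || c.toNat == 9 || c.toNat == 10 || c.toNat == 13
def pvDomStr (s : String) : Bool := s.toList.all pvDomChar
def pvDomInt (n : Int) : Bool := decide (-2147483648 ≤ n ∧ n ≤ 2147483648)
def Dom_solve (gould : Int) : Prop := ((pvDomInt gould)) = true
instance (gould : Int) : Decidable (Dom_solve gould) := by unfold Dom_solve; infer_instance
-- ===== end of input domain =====

-- B replaces A's two bit-twiddling while-loops (mantissa normalization, denormal right
-- shift) by single closed-form shifts derived from bit_length (objective: simpler, loop-free).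

-- ===== PORT A =====
-- A's 'while (mantissa & 8388608) == 0' loop; the fuel only makes it total
-- (called with fuel 24; mantissa is in [1, 2^24), so at most 23 iterations ever run)
def solveNormLoop : Nat → Int → Int → Int × Int
  | 0, m, e => (m, e)
  | f + 1, m, e =>
      if PySem.Int.band m 8388608 == 0 then solveNormLoop f (m <<< (1 : Nat)) (e - 1)
      else (m, e)

-- A's 'while expv < -126' loop; the fuel only makes it total
-- (called with fuel 32; expv ≥ -149 there, so at most 23 iterations ever run)
def solveDenormLoop : Nat → Int → Int → Int × Int
  | 0, e, m => (e, m)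
  | f + 1, e, m =>
      if e < -126 then solveDenormLoop f (e + 1) (m >>> (1 : Nat))
      else (e, m)

def solve (gould : Int) : Int :=
  let sign := PySem.Int.band gould 2147483648
  let expc := PySem.Int.band gould 2130706432 >>> (24 : Nat)
  let expv := expc - 64
  let mantissa := PySem.Int.band gould 16777215
  if mantissa == 0 then 0
  else
    let p := solveNormLoop 24 mantissa (expv <<< (2 : Nat))
    let mantissa := p.1
    let expv := p.2 - 1
    if expv > 127 then PySem.Int.bor sign 2139095040
    else if expv < -149 then sign
    else if expv > -127 then
      PySem.Int.bor (PySem.Int.bor sign ((expv + 127) <<< (23 : Nat)))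
        (PySem.Int.band mantissa 8388607)
    else
      let q := solveDenormLoop 32 expv mantissa
      PySem.Int.bor (PySem.Int.bor sign 0) (PySem.Int.band q.2 8388607)

-- ===== PORT B =====
def solve_alt (gould : Int) : Int :=
  let sign := PySem.Int.band gould 2147483648
  let expv := (PySem.Int.band gould 2130706432 >>> (24 : Nat)) - 64
  let mantissa := PySem.Int.band gould 16777215
  if mantissa == 0 then 0
  else
    let shift : Nat := 24 - PySem.Int.bitLength mantissa
    let mantissa := mantissa <<< shift
    let expv := (expv <<< (2 : Nat)) - (shift : Int) - 1
    if expv > 127 then PySem.Int.bor sign 2139095040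
    else if expv < -149 then sign
    else if expv > -127 then
      PySem.Int.bor (PySem.Int.bor sign ((expv + 127) <<< (23 : Nat)))
        (PySem.Int.band mantissa 8388607)
    else
      -- Python 'mantissa >> (-126 - expv)': the shift count is ≥ 1 in this branch, toNat is exact
      PySem.Int.bor sign (PySem.Int.band (mantissa >>> (-126 - expv).toNat) 8388607)

-- ===== PRECONDITION & SPEC =====
def Spec_solve (gould : Int) (out : Int) : Prop := out = solve_alt gould
instance (gould : Int) (out : Int) : Decidable (Spec_solve gould out) := by unfold Spec_solve; infer_instance

-- ===== CLAIM (what is proved, stated in full; the proofs are below) =====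
def Claim_equal_solve : Prop := ∀ (gould : Int), Dom_solve gould → Spec_solve gould (solve gould)

-- ===== LEMMAS AND PROOFS =====

-- the mantissa mask always lands in [0, 2^24)
theorem band_mask24_bounds (a : Int) :
    0 ≤ PySem.Int.band a 16777215 ∧ PySem.Int.band a 16777215 < 16777216 := by
  unfold PySem.Int.band
  split_ifs with h h2 h3
  · have h1 : a.toNat &&& (16777215 : Int).toNat ≤ (16777215 : Int).toNat := Nat.and_le_right
    constructor
    · positivity
    · exact_mod_cast lt_of_le_of_lt h1 (by norm_num)
  · norm_num at h2
  · have h1 : (16777215 : Int).toNat - ((16777215 : Int).toNat &&& (-a - 1).toNat)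
        ≤ (16777215 : Int).toNat := Nat.sub_le _ _
    constructor
    · positivity
    · exact_mod_cast lt_of_le_of_lt h1 (by norm_num)
  · norm_num at h3

-- bit_length of a positive m is the unique bl with 2^(bl-1) ≤ m < 2^bl
theorem bitLength_facts (m : Nat) (h : 0 < m) :
    2 ^ (PySem.Int.bitLength (m : Int) - 1) ≤ m ∧ m < 2 ^ PySem.Int.bitLength (m : Int)
      ∧ 1 ≤ PySem.Int.bitLength (m : Int) := by
  have h1 := PySem.Int.two_pow_bitLength_le (m : Int) (by exact_mod_cast h.ne')
  have h2 := PySem.Int.lt_two_pow_bitLength (m : Int)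
  simp only [Int.natAbs_natCast] at h1 h2
  refine ⟨h1, h2, ?_⟩
  by_contra hb
  have hb0 : PySem.Int.bitLength (m : Int) = 0 := by omega
  rw [hb0] at h2
  omega

-- A's loop test 'mantissa & 8388608 == 0' means exactly 'mantissa < 2^23' (given mantissa < 2^24)
theorem band_test (m : Nat) (h : 0 < m) (h24 : m < 16777216) :
    ((PySem.Int.band (m : Int) 8388608 == 0) = true ↔ m < 8388608) := by
  have hc : PySem.Int.band (m : Int) 8388608 = ((m &&& 8388608 : Nat) : Int) := by
    exact_mod_cast PySem.Int.band_natCast m 8388608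
  rw [hc]
  have h2 : m &&& 8388608 = (m.testBit 23).toNat * 8388608 := by
    have := Nat.and_two_pow m 23
    norm_num at this
    exact this
  have h3 : m.testBit 23 = decide (m / 2 ^ 23 % 2 = 1) := Nat.testBit_eq_decide_div_mod_eq ..
  norm_num at h3
  rw [h2, h3]
  by_cases hd : m / 8388608 % 2 = 1 <;> simp [hd] <;> omega

theorem bitLength_double (m : Nat) (h : 0 < m) :
    PySem.Int.bitLength ((2 * m : Nat) : Int) = PySem.Int.bitLength (m : Int) + 1 := by
  have := PySem.Int.bitLength_natCast (m := 2 * m) (by omega)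
  simpa [Nat.mul_div_cancel_left m (by norm_num : 0 < 2)] using this

-- closed form of A's normalization loop: it shifts exactly 24 - bit_length(m) times
theorem normLoop_eq (f : Nat) : ∀ (m : Nat) (e : Int), 0 < m → m < 16777216 →
    24 - PySem.Int.bitLength (m : Int) ≤ f →
    solveNormLoop f (m : Int) e =
      ((m : Int) <<< (24 - PySem.Int.bitLength (m : Int)),
        e - (24 - PySem.Int.bitLength (m : Int) : Nat)) := by
  induction f with
  | zero =>
    intro m e hm h24 hf
    obtain ⟨hlo, hhi, h1⟩ := bitLength_facts m hm
    have hs : 24 - PySem.Int.bitLength (m : Int) = 0 := by omega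
    simp [solveNormLoop, hs, Int.shiftLeft_eq]
  | succ f ih =>
    intro m e hm h24 hf
    obtain ⟨hlo, hhi, h1⟩ := bitLength_facts m hm
    have hble : PySem.Int.bitLength (m : Int) ≤ 24 := by
      by_contra hb
      have : 2 ^ 24 ≤ 2 ^ (PySem.Int.bitLength (m : Int) - 1) :=
        Nat.pow_le_pow_right (by norm_num) (by omega)
      omega
    rw [solveNormLoop]
    by_cases hlt : m < 8388608
    · rw [if_pos (by rw [band_test m hm h24]; exact hlt)]
      have hsm : ((m : Int) <<< (1 : Nat)) = ((2 * m : Nat) : Int) := by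
        rw [Int.shiftLeft_eq]; push_cast; ring
      have hbl2 := bitLength_double m hm
      have hble2 : PySem.Int.bitLength (m : Int) ≤ 23 := by
        by_contra hb
        have : 2 ^ 23 ≤ 2 ^ (PySem.Int.bitLength (m : Int) - 1) :=
          Nat.pow_le_pow_right (by norm_num) (by omega)
        omega
      rw [hsm, ih (2 * m) (e - 1) (by omega) (by omega) (by rw [hbl2]; omega)]
      rw [hbl2]
      simp only [Prod.mk.injEq]
      constructor
      · rw [Int.shiftLeft_eq, Int.shiftLeft_eq]
        have hstep : (24 - (PySem.Int.bitLength (m : Int) + 1)) + 1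
            = 24 - PySem.Int.bitLength (m : Int) := by omega
        rw [← hstep, pow_succ]
        push_cast; ring
      · have hcast : ((24 - (PySem.Int.bitLength (m : Int) + 1) : Nat) : Int)
            = ((24 - PySem.Int.bitLength (m : Int) : Nat) : Int) - 1 := by omega
        rw [hcast]; ring
    · rw [if_neg (by simp only [band_test m hm h24]; simpa using hlt)]
      have hbl24 : PySem.Int.bitLength (m : Int) = 24 := by
        by_contra hb
        have : 2 ^ PySem.Int.bitLength (m : Int) ≤ 2 ^ 23 :=
          Nat.pow_le_pow_right (by norm_num) (by omega)
        omega
      simp [hbl24, Int.shiftLeft_eq]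

-- closed form of A's denormal loop: k single right shifts are one shift by k
theorem denormLoop_eq (k : Nat) : ∀ (f : Nat) (e m : Int), e = -126 - (k : Int) → k ≤ f →
    solveDenormLoop f e m = (-126, m >>> k) := by
  induction k with
  | zero =>
    intro f e m he hk
    cases f with
    | zero => simp [solveDenormLoop, he, Int.shiftRight_zero]
    | succ f => rw [solveDenormLoop, if_neg (by omega)]; simp [he]
  | succ k ih =>
    intro f e m he hk
    obtain ⟨f, rfl⟩ : ∃ f', f = f' + 1 := ⟨f - 1, by omega⟩
    rw [solveDenormLoop, if_pos (by push_cast at he ⊢; omega)]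
    rw [ih f (e + 1) (m >>> (1 : Nat)) (by push_cast at he ⊢; omega) (by omega)]
    rw [← Int.shiftRight_add, Nat.add_comm]

theorem solve_eq (gould : Int) : solve gould = solve_alt gould := by
  unfold solve solve_alt
  dsimp only []
  obtain ⟨hm0, hm24⟩ := band_mask24_bounds gould
  obtain ⟨m, hm⟩ : ∃ m : Nat, PySem.Int.band gould 16777215 = (m : Int) :=
    ⟨(PySem.Int.band gould 16777215).toNat, (Int.toNat_of_nonneg hm0).symm⟩
  rw [hm] at hm0 hm24 ⊢
  by_cases hz : m = 0
  · simp [hz]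
  · have hmpos : 0 < m := Nat.pos_of_ne_zero hz
    have hm24' : m < 16777216 := by exact_mod_cast hm24
    set e' : Int := (PySem.Int.band gould 2130706432 >>> (24 : Nat) - 64) <<< (2 : Nat) with he'
    set s : Nat := 24 - PySem.Int.bitLength (m : Int) with hs
    have hp := normLoop_eq 24 m e' hmpos hm24' (by omega)
    have hp1 : (solveNormLoop 24 (m : Int) e').1 = (m : Int) <<< s := by rw [hp]
    have hp2 : (solveNormLoop 24 (m : Int) e').2 = e' - (s : Int) := by rw [hp]
    rw [hp1, hp2]
    set E : Int := e' - (s : Int) - 1 with hE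
    split_ifs with h0 h1 h2 h3
    · rfl
    · rfl
    · rfl
    · rfl
    · have hk : E = -126 - ((-126 - E).toNat : Int) := by omega
      rw [denormLoop_eq (-126 - E).toNat 32 E _ hk (by omega), PySem.Int.bor_zero]

-- ===== VERDICT (by name: the statement is the Claim_ definition above) =====
theorem solve_spec : Claim_equal_solve := by
  intro gould _
  exact solve_eq gould
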